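-- pv_equiv track=rewrite | github.com/qwe789qwec/farm-merge-arrange | test.py | diagonal_snake_traverse
-- ===== SOURCE A (Python) =====
-- def diagonal_snake_traverse(matrix):
--     rows, cols = len(matrix), len(matrix[0])
--     result = []
--
--     for d in range(rows + cols - 1):
--         if d % 2 == 0:
--             # 偶數對角線：從下到上
--             i = min(d, rows - 1)
--             j = d - i
--             while i >= 0 and j < cols:
--                 result.append(matrix[i][j])
--                 i -= 1
--                 j += 1
--         else:
--             # 奇數對角線：從上到下
--             j = min(d, cols - 1)
--             i = d - j
--             while j >= 0 and i < rows:
--                 result.append(matrix[i][j])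
--                 i += 1
--                 j -= 1
--
--     return result
-- ===== SOURCE B (Python) =====
-- def diagonal_snake_traverse(matrix):
--     rows, cols = len(matrix), len(matrix[0])
--     buckets = [[] for _ in range(rows + cols - 1)]
--     for i, row in enumerate(matrix):
--         for j in range(cols):
--             buckets[i + j].append(row[j])
--     result = []
--     for d, bucket in enumerate(buckets):
--         result += bucket if d % 2 == 1 else bucket[::-1]
--     return result
-- ===== Notes on version B (the rewrite author's own statement) =====
-- stated objective: alternative
-- what changed: Replaces A's per-diagonal zigzag while-walks (computing a start cell and stepping i/j with sentinel bounds for each diagonal) by a single pass over all cells bucketing them by diagonal index i+j, then concatenating each bucket as-is (odd d) or reversed (even d).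
import Mathlib
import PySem

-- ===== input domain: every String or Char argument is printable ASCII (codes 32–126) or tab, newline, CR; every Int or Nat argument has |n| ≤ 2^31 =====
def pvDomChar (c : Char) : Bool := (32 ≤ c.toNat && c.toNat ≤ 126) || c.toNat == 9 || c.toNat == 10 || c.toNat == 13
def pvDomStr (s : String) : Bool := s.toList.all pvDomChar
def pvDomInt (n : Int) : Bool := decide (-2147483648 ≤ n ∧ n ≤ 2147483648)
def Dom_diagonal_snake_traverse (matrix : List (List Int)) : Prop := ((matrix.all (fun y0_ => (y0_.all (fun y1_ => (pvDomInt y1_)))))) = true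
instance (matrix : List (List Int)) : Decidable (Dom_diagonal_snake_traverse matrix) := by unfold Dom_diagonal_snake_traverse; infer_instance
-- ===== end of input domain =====

-- B replaces A's per-diagonal zigzag while-walks by one pass over all cells into buckets
-- indexed by i+j, concatenated as-is (odd d) or reversed (even d); same cost, different structure.

-- ===== PORT A =====
-- matrix[i][j] (both indices nonnegative wherever A's loops read; default 0 is never used inside Pre_)
def pvCellA (m : List (List Int)) (i j : Int) : Int :=
  ((PySem.List.pyGet? m i).bind (fun r => PySem.List.pyGet? r j)).getD 0

-- A's even-diagonal while loop: i -= 1, j += 1 while i >= 0 and j < cols (fuel > initial i)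
def pvUpWalk (m : List (List Int)) (cols : Int) : Nat → Int → Int → List Int
  | 0, _, _ => []
  | fuel+1, i, j => if i ≥ 0 ∧ j < cols then pvCellA m i j :: pvUpWalk m cols fuel (i-1) (j+1) else []

-- A's odd-diagonal while loop: i += 1, j -= 1 while j >= 0 and i < rows (fuel > initial j)
def pvDownWalk (m : List (List Int)) (rows : Int) : Nat → Int → Int → List Int
  | 0, _, _ => []
  | fuel+1, i, j => if j ≥ 0 ∧ i < rows then pvCellA m i j :: pvDownWalk m rows fuel (i+1) (j-1) else []

def diagonal_snake_traverse (matrix : List (List Int)) : List Int :=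
  match matrix with
  | [] => []   -- Python raises IndexError on len(matrix[0]); excluded by Pre_
  | r0 :: _ =>
    let rows : Int := matrix.length
    let cols : Int := r0.length
    (List.range (matrix.length + r0.length - 1)).foldl
      (fun (result : List Int) (d : Nat) =>
        if (d:Int) % 2 == 0 then
          let i := min (d:Int) (rows - 1)
          result ++ pvUpWalk matrix cols (i.toNat + 1) i ((d:Int) - i)
        else
          let j := min (d:Int) (cols - 1)
          result ++ pvDownWalk matrix rows (j.toNat + 1) ((d:Int) - j) j)
      []

-- ===== PORT B =====
-- buckets[k].append(x)
def pvBump : List (List Int) → Nat → Int → List (List Int)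
  | [], _, _ => []
  | b :: bs, 0, x => (b ++ [x]) :: bs
  | b :: bs, k+1, x => b :: pvBump bs k x

def diagonal_snake_traverse_alt (matrix : List (List Int)) : List Int :=
  match matrix with
  | [] => []   -- Python raises IndexError on len(matrix[0]); excluded by Pre_
  | r0 :: _ =>
    let cols := r0.length
    let buckets :=
      (matrix.foldl
        (fun (st : List (List Int) × Nat) row =>
          ((List.range cols).foldl (fun bs j => pvBump bs (st.2 + j) (row.getD j 0)) st.1,
           st.2 + 1))
        (List.replicate (matrix.length + cols - 1) [], 0)).1
    (buckets.foldl
      (fun (st : List Int × Nat) b =>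
        (st.1 ++ (if st.2 % 2 == 1 then b else b.reverse), st.2 + 1))
      ([], 0)).1

-- ===== PRECONDITION & SPEC =====
-- Pre_ excludes exactly the inputs on which Python A raises IndexError: the empty matrix
-- (len(matrix[0])) and matrices with some row shorter than the first row (matrix[i][j] read).
def Pre_diagonal_snake_traverse (matrix : List (List Int)) : Prop :=
  matrix ≠ [] ∧ ∀ r ∈ matrix, (matrix.headD []).length ≤ r.length
instance (matrix : List (List Int)) : Decidable (Pre_diagonal_snake_traverse matrix) := by
  unfold Pre_diagonal_snake_traverse; infer_instance

def pvWitness_diagonal_snake_traverse : List (List Int) := [[1, 2, 3], [4, 5, 6], [7, 8, 9]]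

def Spec_diagonal_snake_traverse (matrix : List (List Int)) (out : List Int) : Prop := out = diagonal_snake_traverse_alt matrix
instance (matrix : List (List Int)) (out : List Int) : Decidable (Spec_diagonal_snake_traverse matrix out) := by unfold Spec_diagonal_snake_traverse; infer_instance

-- ===== CLAIM (what is proved, stated in full; the proofs are below) =====
def Claim_equal_diagonal_snake_traverse : Prop := ∀ (matrix : List (List Int)), Dom_diagonal_snake_traverse matrix → Pre_diagonal_snake_traverse matrix → Spec_diagonal_snake_traverse matrix (diagonal_snake_traverse matrix)

-- ===== LEMMAS AND PROOFS =====

-- reference cell value: matrix[i][j] with default 0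
def pvGCell (m : List (List Int)) (i j : Nat) : Int := (m.getD i []).getD j 0

-- what the row pass contributes to bucket d, scanning rows rs whose first row has index i
def pvContrib (cols d : Nat) : List (List Int) → Nat → List Int
  | [], _ => []
  | r :: rt, i => (if i ≤ d ∧ d - i < cols then [r.getD (d - i) 0] else []) ++ pvContrib cols d rt (i + 1)

-- the result-assembly pass of B, as a function of the bucket list and the running index
def pvZig : List (List Int) → Nat → List Int
  | [], _ => []
  | b :: bt, i => (if i % 2 == 1 then b else b.reverse) ++ pvZig bt (i + 1)

lemma cellA_eq (m : List (List Int)) (i j : Nat) (hi : i < m.length) :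
    pvCellA m (i:Int) (j:Int) = pvGCell m i j := by
  simp [pvCellA, pvGCell, PySem.List.pyGet?_natCast, List.getElem?_eq_getElem hi,
        List.getD_eq_getElem?_getD]

lemma upWalk_neg (m : List (List Int)) (cols : Int) (f : Nat) (i j : Int) (h : i < 0) :
    pvUpWalk m cols f i j = [] := by
  cases f <;> simp [pvUpWalk] <;> omega

lemma downWalk_neg (m : List (List Int)) (rows : Int) (f : Nat) (i j : Int) (h : j < 0) :
    pvDownWalk m rows f i j = [] := by
  cases f <;> simp [pvDownWalk] <;> omega

lemma up_eq (m : List (List Int)) (cols d : Nat) :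
    ∀ (fuel : Nat) (i : Nat), i < fuel → i < m.length → i ≤ d →
    pvUpWalk m (cols:Int) fuel (i:Int) ((d:Int) - (i:Int)) =
      ((List.range' (d+1-cols) (i + 1 - (d+1-cols))).map (fun k => pvGCell m k (d-k))).reverse := by
  intro fuel
  induction fuel with
  | zero => omega
  | succ f ih =>
    intro i hif hil hid
    by_cases hc : d + 1 - cols ≤ i
    · have hcond : ((i:Int) ≥ 0 ∧ (d:Int) - (i:Int) < (cols:Int)) := by omega
      by_cases hi0 : i = 0
      · subst hi0
        have hlo : d + 1 - cols = 0 := by omega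
        simp only [pvUpWalk, if_pos hcond]
        rw [upWalk_neg m cols f _ _ (by omega)]
        have hcell := cellA_eq m 0 d hil
        simp only [Nat.cast_zero] at hcell
        simp [hlo, List.range'_succ, hcell]
      · have h1 : (i:Int) - 1 = ((i-1 : Nat) : Int) := by omega
        have h2 : (d:Int) - (i:Int) + 1 = (d:Int) - ((i-1:Nat):Int) := by omega
        simp only [pvUpWalk, if_pos hcond, h1, h2]
        rw [ih (i-1) (by omega) (by omega) (by omega)]
        have h3 : (d:Int) - (i:Int) = ((d - i : Nat) : Int) := by omega
        rw [h3, cellA_eq m i (d-i) hil]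
        have h4 : i + 1 - (d+1-cols) = (i - (d+1-cols)) + 1 := by omega
        have h4' : i - 1 + 1 - (d+1-cols) = i - (d+1-cols) := by omega
        rw [h4', h4, List.range'_concat]
        have h5 : (d+1-cols) + 1 * (i - (d+1-cols)) = i := by omega
        rw [h5, List.map_append, List.reverse_append]
        simp
    · have hcond : ¬ ((i:Int) ≥ 0 ∧ (d:Int) - (i:Int) < (cols:Int)) := by omega
      have h0 : i + 1 - (d+1-cols) = 0 := by omega
      simp only [pvUpWalk]
      rw [if_neg hcond, h0]
      simp
lemma down_eq (m : List (List Int)) (d : Nat) :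
    ∀ (fuel : Nat) (i : Nat), d - i < fuel →
    pvDownWalk m (m.length:Int) fuel (i:Int) ((d:Int) - (i:Int)) =
      (List.range' i (min (d+1) m.length - i)).map (fun k => pvGCell m k (d-k)) := by
  intro fuel
  induction fuel with
  | zero => omega
  | succ f ih =>
    intro i hif
    by_cases hc : i ≤ d ∧ i < m.length
    · have hcond : ((d:Int) - (i:Int) ≥ 0 ∧ (i:Int) < (m.length:Int)) := by omega
      simp only [pvDownWalk, if_pos hcond]
      have h3 : (d:Int) - (i:Int) = ((d - i : Nat) : Int) := by omega
      rw [h3, cellA_eq m i (d-i) hc.2]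
      have hlen : min (d+1) m.length - i = (min (d+1) m.length - (i+1)) + 1 := by omega
      rw [hlen, List.range'_succ]
      by_cases hid : i = d
      · subst hid
        rw [downWalk_neg m _ f _ _ (by omega)]
        have h5 : min (i+1) m.length - (i+1) = 0 := by omega
        simp [h5]
      · have h1 : (i:Int) + 1 = ((i+1 : Nat) : Int) := by omega
        have h2 : ((d-i:Nat):Int) - 1 = (d:Int) - ((i+1:Nat):Int) := by omega
        rw [h1, h2, ih (i+1) (by omega)]
        simp
    · have hcond : ¬ ((d:Int) - (i:Int) ≥ 0 ∧ (i:Int) < (m.length:Int)) := by omega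
      have h0 : min (d+1) m.length - i = 0 := by omega
      simp only [pvDownWalk]
      rw [if_neg hcond, h0]
      simp

lemma bump_length (bs : List (List Int)) : ∀ (k : Nat) (x : Int), (pvBump bs k x).length = bs.length := by
  induction bs with
  | nil => intro k x; rfl
  | cons b bt ih => intro k x; cases k <;> simp [pvBump, ih]

lemma bump_getD (bs : List (List Int)) : ∀ (k n : Nat) (x : Int),
    (pvBump bs k x).getD n [] = if n = k ∧ k < bs.length then bs.getD n [] ++ [x] else bs.getD n [] := by
  induction bs with
  | nil => intro k n x; simp [pvBump]
  | cons b bt ih =>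
    intro k n x
    cases k with
    | zero => cases n <;> simp [pvBump]
    | succ j =>
      cases n with
      | zero => simp [pvBump]
      | succ nn =>
        simp only [pvBump, List.getD_cons_succ]
        rw [ih j nn x]
        by_cases h : nn = j ∧ j < bt.length
        · have h' : nn+1 = j+1 ∧ j+1 < (b::bt).length := by simp only [List.length_cons]; omega
          simp [h, h']
        · have h' : ¬ (nn+1 = j+1 ∧ j+1 < (b::bt).length) := by simp only [List.length_cons]; omega
          simp [h, h']

lemma inner_length (row : List Int) (i : Nat) : ∀ (c : Nat) (bs : List (List Int)),
    ((List.range c).foldl (fun bs j => pvBump bs (i+j) (row.getD j 0)) bs).length = bs.length := by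
  intro c
  induction c with
  | zero => intro bs; rfl
  | succ cc ih =>
    intro bs
    rw [List.range_succ, List.foldl_append]
    simp only [List.foldl_cons, List.foldl_nil]
    rw [bump_length, ih]

lemma inner_getD (row : List Int) (i d : Nat) : ∀ (c : Nat) (bs : List (List Int)),
    ((List.range c).foldl (fun bs j => pvBump bs (i+j) (row.getD j 0)) bs).getD d [] =
      bs.getD d [] ++ (if i ≤ d ∧ d - i < c ∧ d < bs.length then [row.getD (d-i) 0] else []) := by
  intro c
  induction c with
  | zero => intro bs; simp
  | succ cc ih =>
    intro bs
    rw [List.range_succ, List.foldl_append]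
    simp only [List.foldl_cons, List.foldl_nil]
    rw [bump_getD, inner_length, ih]
    by_cases h : d = i + cc ∧ i + cc < bs.length
    · have h1 : ¬ (i ≤ d ∧ d - i < cc ∧ d < bs.length) := by omega
      have h2 : i ≤ d ∧ d - i < cc + 1 ∧ d < bs.length := by omega
      have h3 : d - i = cc := by omega
      simp [h, h1, h2, h3]
    · have h4 : (i ≤ d ∧ d - i < cc ∧ d < bs.length) ↔ (i ≤ d ∧ d - i < cc + 1 ∧ d < bs.length) := by omega
      simp only [if_neg h]
      by_cases h5 : i ≤ d ∧ d - i < cc ∧ d < bs.length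
      · simp [h5, h4.mp h5]
      · have h6 : ¬ (i ≤ d ∧ d - i < cc + 1 ∧ d < bs.length) := fun hh => h5 (h4.mpr hh)
        rw [if_neg h5, if_neg h6]

lemma outer_length (cols : Nat) : ∀ (rs : List (List Int)) (bs : List (List Int)) (i : Nat),
    ((rs.foldl
        (fun (st : List (List Int) × Nat) row =>
          ((List.range cols).foldl (fun bs j => pvBump bs (st.2 + j) (row.getD j 0)) st.1,
           st.2 + 1))
        (bs, i)).1).length = bs.length := by
  intro rs
  induction rs with
  | nil => intro bs i; rfl
  | cons r rt ih => intro bs i; simp only [List.foldl_cons]; rw [ih]; exact inner_length r i cols bs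

lemma outer_getD (cols d : Nat) : ∀ (rs : List (List Int)) (bs : List (List Int)) (i : Nat),
    d < bs.length →
    ((rs.foldl
        (fun (st : List (List Int) × Nat) row =>
          ((List.range cols).foldl (fun bs j => pvBump bs (st.2 + j) (row.getD j 0)) st.1,
           st.2 + 1))
        (bs, i)).1).getD d [] = bs.getD d [] ++ pvContrib cols d rs i := by
  intro rs
  induction rs with
  | nil => intro bs i h; simp [pvContrib]
  | cons r rt ih =>
    intro bs i h
    simp only [List.foldl_cons]
    rw [ih _ (i+1) (by rw [inner_length]; exact h)]
    rw [inner_getD]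
    simp only [pvContrib]
    rw [List.append_assoc]
    congr 1
    congr 1
    simp [h]

lemma contrib_eq (m : List (List Int)) (cols d : Nat) :
    ∀ (n k : Nat), m.length - k ≤ n →
    pvContrib cols d (m.drop k) k =
      (List.range' (max k (d+1-cols)) (min (d+1) m.length - max k (d+1-cols))).map
        (fun i => pvGCell m i (d-i)) := by
  intro n
  induction n with
  | zero =>
    intro k hk
    have h1 : m.drop k = [] := List.drop_eq_nil_of_le (by omega)
    have h2 : min (d+1) m.length - max k (d+1-cols) = 0 := by omega
    simp [h1, h2, pvContrib]
  | succ nn ih =>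
    intro k hk
    by_cases hkm : k < m.length
    · rw [List.drop_eq_getElem_cons hkm]
      simp only [pvContrib]
      rw [ih (k+1) (by omega)]
      by_cases hc : k ≤ d ∧ d - k < cols
      · have hmax : max k (d+1-cols) = k := by omega
        have hmax' : max (k+1) (d+1-cols) = k+1 := by omega
        have hlen : min (d+1) m.length - k = (min (d+1) m.length - (k+1)) + 1 := by omega
        rw [hmax, hmax', hlen, List.range'_succ]
        simp [hc, pvGCell, List.getD_eq_getElem?_getD, List.getElem?_eq_getElem hkm]
      · by_cases hkd : k > d
        · have h2 : min (d+1) m.length - max k (d+1-cols) = 0 := by omega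
          have h3 : min (d+1) m.length - max (k+1) (d+1-cols) = 0 := by omega
          simp [h2, h3, hc]
        · have hmax : max k (d+1-cols) = d+1-cols := by omega
          have hmax' : max (k+1) (d+1-cols) = d+1-cols := by omega
          simp [hc, hmax, hmax']
    · have h1 : m.drop k = [] := List.drop_eq_nil_of_le (by omega)
      have h2 : min (d+1) m.length - max k (d+1-cols) = 0 := by omega
      simp [h1, h2, pvContrib]

lemma zig_eq : ∀ (bs : List (List Int)) (res : List Int) (i : Nat),
    (bs.foldl
      (fun (st : List Int × Nat) b =>
        (st.1 ++ (if st.2 % 2 == 1 then b else b.reverse), st.2 + 1))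
      (res, i)).1 = res ++ pvZig bs i := by
  intro bs
  induction bs with
  | nil => intro res i; simp [pvZig]
  | cons b bt ih =>
    intro res i
    simp only [List.foldl_cons]
    rw [ih]
    simp only [pvZig]
    rw [List.append_assoc]

lemma flat_to_zig : ∀ (bs : List (List Int)) (i : Nat) (g : Nat → List Int),
    (∀ k, k < bs.length → g (i + k) = (if (i+k) % 2 == 1 then bs.getD k [] else (bs.getD k []).reverse)) →
    (List.range' i bs.length).flatMap g = pvZig bs i := by
  intro bs
  induction bs with
  | nil => intro i g h; simp [pvZig]
  | cons b bt ih =>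
    intro i g hg
    simp only [List.length_cons, List.range'_succ, List.flatMap_cons, pvZig]
    congr 1
    · have := hg 0 (by simp)
      simpa using this
    · exact ih (i+1) g (fun k hk => by
        have := hg (k+1) (by simpa using Nat.succ_lt_succ hk)
        simpa [Nat.add_assoc, Nat.add_comm 1 k, Nat.add_left_comm] using this)


lemma foldl_if_append (p : Nat → Bool) (f g : Nat → List Int) (l : List Nat) (acc : List Int) :
    l.foldl (fun res d => if p d then res ++ f d else res ++ g d) acc
      = acc ++ l.flatMap (fun d => if p d then f d else g d) := by
  induction l generalizing acc with
  | nil => simp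
  | cons a t ih =>
    simp only [List.foldl_cons, List.flatMap_cons]
    rw [ih]
    by_cases h : p a <;> simp [h]

-- ===== VERDICT (by name: the statement is the Claim_ definition above) =====
theorem diagonal_snake_traverse_spec : Claim_equal_diagonal_snake_traverse := by
  intro matrix _ hpre
  unfold Spec_diagonal_snake_traverse
  cases matrix with
  | nil => exact absurd rfl hpre.1
  | cons r0 rest =>
    simp only [diagonal_snake_traverse, diagonal_snake_traverse_alt]
    set m : List (List Int) := r0 :: rest with hm
    set cols : Nat := r0.length with hcols
    set D : Nat := m.length + cols - 1 with hD
    -- B side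
    set buckets : List (List Int) :=
      (m.foldl
        (fun (st : List (List Int) × Nat) row =>
          ((List.range cols).foldl (fun bs j => pvBump bs (st.2 + j) (row.getD j 0)) st.1,
           st.2 + 1))
        (List.replicate D [], 0)).1 with hbuckets
    have hblen : buckets.length = D := by
      rw [hbuckets, outer_length, List.length_replicate]
    have hbget : ∀ dd, dd < D → buckets.getD dd [] =
        (List.range' (dd+1-cols) (min (dd+1) m.length - (dd+1-cols))).map
          (fun k => pvGCell m k (dd-k)) := by
      intro dd hdd
      rw [hbuckets, outer_getD cols dd m _ 0 (by simpa using hdd),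
          List.getD_replicate [] hdd]
      have h0 : pvContrib cols dd m 0 = pvContrib cols dd (m.drop 0) 0 := by rw [List.drop_zero]
      rw [List.nil_append, h0, contrib_eq m cols dd m.length 0 (by omega)]
      have hmax : max 0 (dd+1-cols) = dd+1-cols := by omega
      rw [hmax]
    have hB : (buckets.foldl
        (fun (st : List Int × Nat) b =>
          (st.1 ++ (if st.2 % 2 == 1 then b else b.reverse), st.2 + 1))
        ([], 0)).1 = pvZig buckets 0 := by
      rw [zig_eq, List.nil_append]
    rw [hB]
    -- A side
    rw [foldl_if_append (fun d => ((d:Int) % 2 == 0))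
      (fun d => pvUpWalk m (cols:Int) ((min (d:Int) ((m.length:Int) - 1)).toNat + 1)
        (min (d:Int) ((m.length:Int) - 1)) ((d:Int) - min (d:Int) ((m.length:Int) - 1)))
      (fun d => pvDownWalk m (m.length:Int) ((min (d:Int) ((cols:Int) - 1)).toNat + 1)
        ((d:Int) - min (d:Int) ((cols:Int) - 1)) (min (d:Int) ((cols:Int) - 1)))]
    rw [List.nil_append, show List.range D = List.range' 0 D from List.range_eq_range',
        show D = buckets.length from hblen.symm]
    apply flat_to_zig
    intro k hk
    rw [hblen] at hk
    simp only [Nat.zero_add]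
    rw [hbget k hk]
    by_cases hk2 : k % 2 = 0
    · rw [if_pos (by simp; omega), if_neg (by simp; omega)]
      set i1 : Nat := min k (m.length - 1) with hi1
      have hrows1 : 1 ≤ m.length := by simp [hm]
      have hc1 : min (k:Int) ((m.length:Int)-1) = ((i1:Nat):Int) := by omega
      rw [hc1]
      rw [show (((i1:Nat):Int)).toNat + 1 = i1 + 1 from by omega]
      rw [up_eq m cols k (i1+1) i1 (by omega) (by omega) (by omega)]
      rw [show i1 + 1 - (k+1-cols) = min (k+1) m.length - (k+1-cols) from by
        rw [hD] at hk; omega]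
    · rw [if_neg (by simp; omega), if_pos (by simp; omega)]
      set lo : Nat := k+1-cols with hlo
      have hc1 : min (k:Int) ((cols:Int)-1) = (k:Int) - ((lo:Nat):Int) := by omega
      rw [hc1]
      rw [show (k:Int) - ((k:Int) - ((lo:Nat):Int)) = ((lo:Nat):Int) from by omega]
      rw [show (((k:Int) - ((lo:Nat):Int))).toNat + 1 = (k - lo) + 1 from by omega]
      rw [down_eq m k ((k-lo)+1) lo (by omega)]
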